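-- pv_equiv track=rewrite | github.com/kranasian/finance-ai-penny | planner_code_gen.py | _format_conversation_for_planner
-- ===== SOURCE A (Python) =====
-- from typing import Dict, List, Optional
--
-- def _format_conversation_for_planner(messages: List[Dict]) -> tuple[str, str]:
--   """
--   Format messages into Last User Request and Previous Conversation format.
--
--   Args:
--     messages: List of message dictionaries with 'role' and 'content'
--
--   Returns:
--     Tuple of (last_user_request, previous_conversation)
--   """
--   if not messages:
--     return "", ""
--
--   # Find the last user message
--   last_user_request = ""
--   previous_conversation_parts = []
--
--   for msg in messages:
--     role = msg.get('role', '')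
--     content = msg.get('content', '')
--
--     if role == 'user':
--       last_user_request = content
--       # Build previous conversation up to (but not including) the last user message
--       previous_conversation_parts = []
--       for prev_msg in messages[:messages.index(msg)]:
--         prev_role = prev_msg.get('role', '')
--         prev_content = prev_msg.get('content', '')
--         if prev_role == 'user':
--           previous_conversation_parts.append(f"User: {prev_content}")
--         elif prev_role == 'assistant':
--           previous_conversation_parts.append(f"Assistant: {prev_content}")
--
--   previous_conversation = "\n".join(previous_conversation_parts)
--
--   return last_user_request, previous_conversation
-- ===== SOURCE B (Python) =====
-- from typing import Dict, List, Optional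
--
-- def _format_conversation_for_planner(messages: List[Dict]) -> tuple[str, str]:
--   """Format messages into (last_user_request, previous_conversation)."""
--   last = next((m for m in reversed(messages) if m.get('role', '') == 'user'), None)
--   if last is None:
--     return "", ""
--   parts = []
--   for m in messages[:messages.index(last)]:
--     role = m.get('role', '')
--     if role == 'user':
--       parts.append(f"User: {m.get('content', '')}")
--     elif role == 'assistant':
--       parts.append(f"Assistant: {m.get('content', '')}")
--   return last.get('content', ''), "\n".join(parts)
-- ===== Notes on version B (the rewrite author's own statement) =====
-- stated objective: alternative
-- what changed: B finds the last user message with one backward scan, locates its position with one index() call and formats the preceding transcript once, instead of A's rebuilding the whole prefix (each time with a linear .index scan) at every user message encountered.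
import Mathlib
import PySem

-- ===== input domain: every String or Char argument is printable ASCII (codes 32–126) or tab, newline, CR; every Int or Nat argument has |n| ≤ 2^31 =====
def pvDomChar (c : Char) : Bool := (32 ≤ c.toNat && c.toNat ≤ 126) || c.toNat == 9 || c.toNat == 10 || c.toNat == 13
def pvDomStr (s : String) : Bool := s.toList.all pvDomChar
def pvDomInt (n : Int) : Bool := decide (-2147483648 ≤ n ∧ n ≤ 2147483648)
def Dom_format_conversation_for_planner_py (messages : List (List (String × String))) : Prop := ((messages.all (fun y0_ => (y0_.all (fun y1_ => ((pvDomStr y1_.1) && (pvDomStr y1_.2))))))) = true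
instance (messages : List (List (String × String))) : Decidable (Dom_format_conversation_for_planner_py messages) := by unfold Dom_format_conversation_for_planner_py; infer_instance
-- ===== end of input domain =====

-- B finds the last user message with one backward scan, locates its position with one index() call and
-- formats the preceding transcript once, instead of rebuilding the prefix at every user message encountered.

-- ===== PORT A =====

-- Python dict.get(k, '') on the association-list representation (first binding wins, as the harness converts)
def pvGetS (m : List (String × String)) (k : String) : String :=
  match m with
  | [] => ""
  | (k', v) :: rest => if k' = k then v else pvGetS rest k

-- Python dict == on the association-list representation: same key set, same value at every key
def pvDictEq (d1 d2 : List (String × String)) : Bool :=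
  (d1.map Prod.fst).all (fun k => (d2.map Prod.fst).contains k && pvGetS d1 k == pvGetS d2 k) &&
  (d2.map Prod.fst).all (fun k => (d1.map Prod.fst).contains k)

-- body of A's inner loop over messages[:messages.index(msg)]
def pvStepA (parts : List String) (m : List (String × String)) : List String :=
  let prev_role := pvGetS m "role"
  let prev_content := pvGetS m "content"
  if prev_role = "user" then parts ++ ["User: " ++ prev_content]
  else if prev_role = "assistant" then parts ++ ["Assistant: " ++ prev_content]
  else parts

-- body of A's outer loop; messages[:messages.index(msg)] = the longest prefix with no dict equal to msg
def pvStepOuter (messages : List (List (String × String))) (st : String × List String)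
    (msg : List (String × String)) : String × List String :=
  let role := pvGetS msg "role"
  let _content := pvGetS msg "content"
  if role = "user" then
    (pvGetS msg "content", (messages.takeWhile (fun m => !pvDictEq m msg)).foldl pvStepA [])
  else st

def format_conversation_for_planner_py (messages : List (List (String × String))) : String × String :=
  if messages = [] then ("", "")
  else
    let st := messages.foldl (pvStepOuter messages) ("", ([] : List String))
    (st.1, PySem.Str.join "\n" st.2)

-- ===== PORT B =====

-- body of B's single formatting loop over messages[:messages.index(last)]
def pvStepB (parts : List String) (m : List (String × String)) : List String :=
  let role := pvGetS m "role"
  if role = "user" then parts ++ ["User: " ++ pvGetS m "content"]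
  else if role = "assistant" then parts ++ ["Assistant: " ++ pvGetS m "content"]
  else parts

def format_conversation_for_planner_py_alt (messages : List (List (String × String))) : String × String :=
  -- next((m for m in reversed(messages) if m.get('role','') == 'user'), None)
  match messages.reverse.find? (fun m => pvGetS m "role" == "user") with
  | none => ("", "")
  | some last =>
    -- messages.index(last): first position dict-equal to last
    let cut := messages.findIdx (fun m => pvDictEq m last)
    let parts := (messages.take cut).foldl pvStepB []
    (pvGetS last "content", PySem.Str.join "\n" parts)

-- ===== PRECONDITION & SPEC =====
def Spec_format_conversation_for_planner_py (messages : List (List (String × String))) (out : String × String) : Prop := out = format_conversation_for_planner_py_alt messages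
instance (messages : List (List (String × String))) (out : String × String) : Decidable (Spec_format_conversation_for_planner_py messages out) := by unfold Spec_format_conversation_for_planner_py; infer_instance

-- ===== CLAIM (what is proved, stated in full; the proofs are below) =====
def Claim_equal_format_conversation_for_planner_py : Prop := ∀ (messages : List (List (String × String))), Dom_format_conversation_for_planner_py messages → Spec_format_conversation_for_planner_py messages (format_conversation_for_planner_py messages)

-- ===== LEMMAS AND PROOFS =====

-- index of the last message with role 'user', used only to characterise both ports
def pvLastUserIdx : List (List (String × String)) → Option Nat
  | [] => none
  | m :: rest =>
    match pvLastUserIdx rest with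
    | some i => some (i + 1)
    | none => if pvGetS m "role" = "user" then some 0 else none

theorem pvLastUserIdx_lt {xs : List (List (String × String))} {j : Nat}
    (h : pvLastUserIdx xs = some j) : j < xs.length := by
  induction xs generalizing j with
  | nil => simp [pvLastUserIdx] at h
  | cons m rest ih =>
    simp only [pvLastUserIdx] at h
    cases hr : pvLastUserIdx rest with
    | some i =>
      rw [hr] at h
      cases h
      simpa using Nat.succ_lt_succ (ih hr)
    | none =>
      rw [hr] at h
      by_cases hu : pvGetS m "role" = "user"
      · simp [hu] at h; subst h; simp
      · simp [hu] at h

-- B's backward scan returns exactly the message at the last user index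
theorem find?_reverse_eq (xs : List (List (String × String))) :
    xs.reverse.find? (fun m => pvGetS m "role" == "user")
      = (pvLastUserIdx xs).map (fun j => xs.getD j []) := by
  induction xs with
  | nil => rfl
  | cons x xs ih =>
    rw [List.reverse_cons, List.find?_append, ih]
    cases hr : pvLastUserIdx xs with
    | some i => simp [pvLastUserIdx, hr]
    | none =>
      by_cases hu : pvGetS x "role" = "user"
      · simp [pvLastUserIdx, hr, hu, List.find?]
      · have : (pvGetS x "role" == "user") = false := by simpa using hu
        simp [pvLastUserIdx, hr, hu, List.find?, this]

-- the line produced by one message, if any (proof-side view of both loop bodies)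
def pvFmt (m : List (String × String)) : Option String :=
  let r := pvGetS m "role"
  if r = "user" then some ("User: " ++ pvGetS m "content")
  else if r = "assistant" then some ("Assistant: " ++ pvGetS m "content")
  else none

theorem foldl_pvStepA (xs : List (List (String × String))) :
    ∀ acc, xs.foldl pvStepA acc = acc ++ xs.filterMap pvFmt := by
  induction xs with
  | nil => intro acc; simp
  | cons x xs ih =>
    intro acc
    simp only [List.foldl_cons, List.filterMap_cons, ih]
    by_cases h1 : pvGetS x "role" = "user"
    · simp [pvStepA, pvFmt, h1]
    · by_cases h2 : pvGetS x "role" = "assistant"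
      · simp [pvStepA, pvFmt, h2]
      · simp [pvStepA, pvFmt, h1, h2]

theorem foldl_pvStepB (xs : List (List (String × String))) :
    ∀ acc, xs.foldl pvStepB acc = acc ++ xs.filterMap pvFmt := by
  induction xs with
  | nil => intro acc; simp
  | cons x xs ih =>
    intro acc
    simp only [List.foldl_cons, List.filterMap_cons, ih]
    by_cases h1 : pvGetS x "role" = "user"
    · simp [pvStepB, pvFmt, h1]
    · by_cases h2 : pvGetS x "role" = "assistant"
      · simp [pvStepB, pvFmt, h2]
      · simp [pvStepB, pvFmt, h1, h2]

-- the longest prefix on which p holds is the prefix before the first index where p fails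
theorem takeWhile_eq_take_findIdx {α : Type} (p : α → Bool) :
    ∀ l : List α, l.takeWhile p = l.take (l.findIdx (fun x => !p x)) := by
  intro l
  induction l with
  | nil => rfl
  | cons x xs ih =>
    rw [List.takeWhile_cons, List.findIdx_cons]
    by_cases hx : p x = true
    · simp only [hx, if_true, Bool.not_true, cond_false, List.take_succ_cons, ih]
    · have hx' : p x = false := by simpa using hx
      simp [hx']

-- A's outer loop: its final state is determined by the last user message of the traversed list
theorem foldl_pvStepOuter (M : List (List (String × String))) (xs : List (List (String × String))) :
    ∀ st, xs.foldl (pvStepOuter M) st =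
      match pvLastUserIdx xs with
      | none => st
      | some j =>
        (pvGetS (xs.getD j []) "content",
         (M.takeWhile (fun m => !pvDictEq m (xs.getD j []))).foldl pvStepA []) := by
  induction xs with
  | nil => intro st; simp [pvLastUserIdx]
  | cons x xs ih =>
    intro st
    simp only [List.foldl_cons, ih]
    cases hr : pvLastUserIdx xs with
    | some i =>
      simp [pvLastUserIdx, hr]
    | none =>
      by_cases hu : pvGetS x "role" = "user"
      · simp [pvLastUserIdx, hr, hu, pvStepOuter]
      · simp [pvLastUserIdx, hr, hu, pvStepOuter]

-- ===== VERDICT (by name: the statement is the Claim_ definition above) =====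
theorem format_conversation_for_planner_py_spec : Claim_equal_format_conversation_for_planner_py := by
  intro messages _hDom
  unfold Spec_format_conversation_for_planner_py
  unfold format_conversation_for_planner_py format_conversation_for_planner_py_alt
  rw [find?_reverse_eq]
  cases h : pvLastUserIdx messages with
  | none =>
    by_cases hnil : messages = []
    · simp [hnil]
    · simp only [if_neg hnil, foldl_pvStepOuter, h]
      rfl
  | some j =>
    have hj : j < messages.length := pvLastUserIdx_lt h
    have hnil : messages ≠ [] := by
      intro he; rw [he] at hj; simp at hj
    simp only [if_neg hnil, foldl_pvStepOuter, h, Option.map_some]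
    rw [takeWhile_eq_take_findIdx, foldl_pvStepA, foldl_pvStepB]
    have hpred : (fun m => !!pvDictEq m (messages.getD j [])) =
        (fun m => pvDictEq m (messages.getD j [])) := by
      funext m; rw [Bool.not_not]
    simp only [hpred]
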